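-- pv_equiv track=rewrite | github.com/nuniesmith/ruby | src/lib/services/training/trainer_server.py | _symbols_to_groups
-- ===== SOURCE A (Python) =====
-- ASSET_GROUPS: dict[str, list[str]] = {
--     "metals": ["MGC", "SIL"],
--     "equity_micros": ["MES", "MNQ", "M2K", "MYM"],
--     "treasuries": ["ZN", "ZB"],
--     "agriculture": ["ZW"],
-- }
--
-- def _symbols_to_groups(symbols: list[str]) -> dict[str, list[str]]:
--     """Map a symbol list into asset groups. Ungrouped symbols go into 'other'."""
--     groups: dict[str, list[str]] = {}
--     grouped: set[str] = set()
--     for group_name, group_symbols in ASSET_GROUPS.items():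
--         matched = [s for s in symbols if s in group_symbols]
--         if matched:
--             groups[group_name] = matched
--             grouped.update(matched)
--     remaining = [s for s in symbols if s not in grouped]
--     if remaining:
--         groups["other"] = remaining
--     return groups
-- ===== SOURCE B (Python) =====
-- ASSET_GROUPS: dict[str, list[str]] = {
--     "metals": ["MGC", "SIL"],
--     "equity_micros": ["MES", "MNQ", "M2K", "MYM"],
--     "treasuries": ["ZN", "ZB"],
--     "agriculture": ["ZW"],
-- }
--
-- def _symbols_to_groups(symbols: list[str]) -> dict[str, list[str]]:
--     """Map a symbol list into asset groups. Ungrouped symbols go into 'other'."""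
--     group_of = {s: g for g, members in ASSET_GROUPS.items() for s in members}
--     buckets: dict[str, list[str]] = {}
--     for s in symbols:
--         buckets.setdefault(group_of.get(s, "other"), []).append(s)
--     return {g: buckets[g] for g in [*ASSET_GROUPS, "other"] if g in buckets}
-- ===== Notes on version B (the rewrite author's own statement) =====
-- stated objective: simpler
-- what changed: Replaces the per-group scans over symbols (plus a 'grouped' set and a second remaining pass) by one reverse symbol-to-group index built from ASSET_GROUPS and a single pass over symbols that buckets each symbol via setdefault; groups are then emitted in the fixed group order.
import Mathlib
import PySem

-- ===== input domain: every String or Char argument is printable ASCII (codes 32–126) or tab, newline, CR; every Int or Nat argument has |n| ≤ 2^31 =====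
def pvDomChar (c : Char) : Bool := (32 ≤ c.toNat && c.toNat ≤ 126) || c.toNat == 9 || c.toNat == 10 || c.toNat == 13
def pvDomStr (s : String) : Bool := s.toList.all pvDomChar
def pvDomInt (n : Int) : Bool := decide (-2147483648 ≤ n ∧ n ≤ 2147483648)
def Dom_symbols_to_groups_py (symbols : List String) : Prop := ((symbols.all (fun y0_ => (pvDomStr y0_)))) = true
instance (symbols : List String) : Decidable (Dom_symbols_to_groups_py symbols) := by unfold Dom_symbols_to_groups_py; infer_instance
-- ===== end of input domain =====

-- B replaces A's per-group membership scans over symbols (plus a 'grouped' set and a second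
-- 'remaining' pass) by one reverse symbol→group index and a single bucketing pass (objective: simpler).

-- ===== PORT A =====
def assetGroups : List (String × List String) :=
  [("metals", ["MGC", "SIL"]),
   ("equity_micros", ["MES", "MNQ", "M2K", "MYM"]),
   ("treasuries", ["ZN", "ZB"]),
   ("agriculture", ["ZW"])]

def symbols_to_groups_py (symbols : List String) : List (String × List String) :=
  let st := assetGroups.foldl
    (fun (st : PySem.Dict String (List String) × PySem.Set String) gp =>
      let matched := symbols.filter (fun s => gp.2.contains s)
      if matched ≠ [] then (st.1.insert gp.1 matched, PySem.Set.update st.2 matched) else st)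
    (PySem.Dict.empty, PySem.Set.empty)
  let remaining := symbols.filter (fun s => !(PySem.Set.contains st.2 s))
  let groups := if remaining ≠ [] then st.1.insert "other" remaining else st.1
  groups.items

-- ===== PORT B =====
-- reverse index: {s: g for g, members in ASSET_GROUPS.items() for s in members}
def groupOfDict : PySem.Dict String String :=
  assetGroups.foldl (fun d gp => gp.2.foldl (fun d s => d.insert s gp.1) d) PySem.Dict.empty

-- the single bucketing pass: buckets.setdefault(group_of.get(s, "other"), []).append(s)
def altBuckets (symbols : List String) : PySem.Dict String (List String) :=
  symbols.foldl (fun b s => b.modify (groupOfDict.getD s "other") [] (· ++ [s])) PySem.Dict.empty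

def symbols_to_groups_py_alt (symbols : List String) : List (String × List String) :=
  let buckets := altBuckets symbols
  -- dict comprehension {g: buckets[g] for g in [*ASSET_GROUPS, "other"] if g in buckets}:
  -- the iterated keys are distinct, so its items are exactly this filterMap
  (assetGroups.map Prod.fst ++ ["other"]).filterMap
    (fun g => (buckets.get? g).map (fun v => (g, v)))

-- ===== PRECONDITION & SPEC =====
def Spec_symbols_to_groups_py (symbols : List String) (out : List (String × List String)) : Prop := out = symbols_to_groups_py_alt symbols
instance (symbols : List String) (out : List (String × List String)) : Decidable (Spec_symbols_to_groups_py symbols out) := by unfold Spec_symbols_to_groups_py; infer_instance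

-- ===== CLAIM (what is proved, stated in full; the proofs are below) =====
def Claim_equal_symbols_to_groups_py : Prop := ∀ (symbols : List String), Dom_symbols_to_groups_py symbols → Spec_symbols_to_groups_py symbols (symbols_to_groups_py symbols)

-- ===== LEMMAS AND PROOFS =====

-- the reverse index as a first-match function: which group a symbol lands in
def grpSpec (s : String) : String :=
  if (["MGC", "SIL"] : List String).contains s then "metals"
  else if (["MES", "MNQ", "M2K", "MYM"] : List String).contains s then "equity_micros"
  else if (["ZN", "ZB"] : List String).contains s then "treasuries"
  else if (["ZW"] : List String).contains s then "agriculture"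
  else "other"

lemma groupOfDict_eq : groupOfDict = PySem.Dict.mk
    [("MGC","metals"),("SIL","metals"),("MES","equity_micros"),("MNQ","equity_micros"),
     ("M2K","equity_micros"),("MYM","equity_micros"),("ZN","treasuries"),("ZB","treasuries"),
     ("ZW","agriculture")] := by decide

lemma grp_eq (s : String) : groupOfDict.getD s "other" = grpSpec s := by
  by_cases h0 : s = "MGC"
  · subst h0; decide
  by_cases h1 : s = "SIL"
  · subst h1; decide
  by_cases h2 : s = "MES"
  · subst h2; decide
  by_cases h3 : s = "MNQ"
  · subst h3; decide
  by_cases h4 : s = "M2K"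
  · subst h4; decide
  by_cases h5 : s = "MYM"
  · subst h5; decide
  by_cases h6 : s = "ZN"
  · subst h6; decide
  by_cases h7 : s = "ZB"
  · subst h7; decide
  by_cases h8 : s = "ZW"
  · subst h8; decide
  rw [groupOfDict_eq]
  simp [PySem.Dict.getD_eq_get?_getD, grpSpec, PySem.Dict.get?, h0, h1, h2, h3, h4, h5, h6, h7,
    h8, Ne.symm h0, Ne.symm h1, Ne.symm h2, Ne.symm h3, Ne.symm h4, Ne.symm h5, Ne.symm h6,
    Ne.symm h7, Ne.symm h8]

lemma contains_metals (s : String) :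
    (["MGC", "SIL"] : List String).contains s = (grpSpec s == "metals") := by
  simp only [grpSpec]
  split_ifs with h1 h2 h3 h4 <;> simp_all

lemma contains_equity (s : String) :
    (["MES", "MNQ", "M2K", "MYM"] : List String).contains s = (grpSpec s == "equity_micros") := by
  simp only [grpSpec]
  split_ifs with h1 h2 h3 h4 <;> simp_all
  rcases h1 with rfl | rfl <;> simp_all

lemma contains_treas (s : String) :
    (["ZN", "ZB"] : List String).contains s = (grpSpec s == "treasuries") := by
  simp only [grpSpec]
  split_ifs with h1 h2 h3 h4 <;> simp_all
  · rcases h1 with rfl | rfl <;> simp_all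
  · rcases h2 with rfl | rfl | rfl | rfl <;> simp_all

lemma contains_agri (s : String) :
    (["ZW"] : List String).contains s = (grpSpec s == "agriculture") := by
  simp only [grpSpec]
  split_ifs with h1 h2 h3 h4 <;> simp_all
  · rcases h1 with rfl | rfl <;> simp_all
  · rcases h2 with rfl | rfl | rfl | rfl <;> simp_all
  · rcases h3 with rfl | rfl <;> simp_all

lemma altBuckets_eq (symbols : List String) :
    altBuckets symbols =
      symbols.foldl (fun b s => b.modify (grpSpec s) [] (· ++ [s])) PySem.Dict.empty := by
  simp [altBuckets, grp_eq]

lemma bucket_keys (symbols : List String) :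
    (altBuckets symbols).keys = PySem.Set.ofList (symbols.map (fun s => grpSpec s)) := by
  rw [altBuckets_eq]
  rw [PySem.Dict.keys_foldl_modify_key (key := fun s => grpSpec s) (f := fun _ s => (· ++ [s]))]
  exact PySem.Set.update_nil_left _

lemma bucket_getD (symbols : List String) (g : String) :
    (altBuckets symbols).getD g [] = symbols.filter (fun s => grpSpec s == g) := by
  have h1 : altBuckets symbols = (symbols.map (fun s => (grpSpec s, s))).foldl
      (fun (d : PySem.Dict String (List String)) p => d.modify p.1 [] (· ++ [p.2]))
      PySem.Dict.empty := by
    rw [altBuckets_eq, List.foldl_map]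
  rw [h1, PySem.Dict.getD_foldl_modify_append]
  simp [List.filter_map, Function.comp_def, List.map_map]

lemma bucket_get? (symbols : List String) (g : String) :
    (altBuckets symbols).get? g =
      (if symbols.filter (fun s => grpSpec s == g) = [] then none
       else some (symbols.filter (fun s => grpSpec s == g))) := by
  by_cases hg : g ∈ symbols.map (fun s => grpSpec s)
  · have hne : symbols.filter (fun s => grpSpec s == g) ≠ [] := by
      rcases List.mem_map.mp hg with ⟨s, hs, rfl⟩
      intro h
      have hmemf : s ∈ symbols.filter (fun t => grpSpec t == grpSpec s) :=
        List.mem_filter.mpr ⟨hs, beq_self_eq_true _⟩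
      rw [h] at hmemf; exact absurd hmemf (List.not_mem_nil)
    have hmem : g ∈ (altBuckets symbols).keys := by
      rw [bucket_keys]; exact (PySem.Set.mem_ofList _ _).mpr hg
    have hsome : (altBuckets symbols).get? g ≠ none := by
      simp [PySem.Dict.get?_eq_none_iff_not_mem_keys, hmem]
    rcases h : (altBuckets symbols).get? g with _ | v
    · exact absurd h hsome
    · have := PySem.Dict.getD_of_get?_eq_some (d0 := []) (h := h)
      rw [bucket_getD] at this
      simp [hne, ← this]
  · have hnil : symbols.filter (fun s => grpSpec s == g) = [] := by
      rw [List.filter_eq_nil_iff]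
      intro s hs hf
      exact hg (List.mem_map.mpr ⟨s, hs, by simpa using hf⟩)
    have : (altBuckets symbols).get? g = none := by
      rw [PySem.Dict.get?_eq_none_iff_not_mem_keys, bucket_keys]
      simpa [PySem.Set.mem_ofList _ _] using hg
    simp [hnil, this]

lemma grpSpec_cases (s : String) : grpSpec s = "metals" ∨ grpSpec s = "equity_micros" ∨
    grpSpec s = "treasuries" ∨ grpSpec s = "agriculture" ∨ grpSpec s = "other" := by
  unfold grpSpec; split_ifs <;> simp

lemma step_pair (d : PySem.Dict String (List String)) (gr : PySem.Set String) (g : String)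
    (m : List String) :
    (if m ≠ [] then (d.insert g m, gr.update m) else (d, gr))
      = (if m ≠ [] then d.insert g m else d, gr.update m) := by
  split_ifs with h
  · rfl
  · rw [not_not] at h; subst h; rw [PySem.Set.update_nil]

-- one slice of the output: the group's pair when it has members, nothing otherwise
def olist (symbols : List String) (g : String) : List (String × List String) :=
  if symbols.filter (fun s => grpSpec s == g) ≠ [] then
    [(g, symbols.filter (fun s => grpSpec s == g))] else []

set_option maxHeartbeats 2000000 in
lemma alt_canon (symbols : List String) :
    symbols_to_groups_py_alt symbols =
      olist symbols "metals" ++ olist symbols "equity_micros" ++ olist symbols "treasuries" ++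
      olist symbols "agriculture" ++ olist symbols "other" := by
  simp only [symbols_to_groups_py_alt, assetGroups, List.map, List.cons_append, List.nil_append,
    bucket_get?, List.filterMap_cons, List.filterMap_nil, olist]
  split_ifs <;> simp_all

set_option maxHeartbeats 2000000 in
theorem a_eq_alt (symbols : List String) :
    symbols_to_groups_py symbols = symbols_to_groups_py_alt symbols := by
  have hrem : symbols.filter (fun s => !(PySem.Set.contains
      ((((PySem.Set.empty.update (symbols.filter (fun s => grpSpec s == "metals"))).update
        (symbols.filter (fun s => grpSpec s == "equity_micros"))).update
        (symbols.filter (fun s => grpSpec s == "treasuries"))).update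
        (symbols.filter (fun s => grpSpec s == "agriculture"))) s))
      = symbols.filter (fun s => grpSpec s == "other") := by
    apply List.filter_congr
    intro s hs
    have hmem : s ∈ ((((PySem.Set.empty.update (symbols.filter (fun s => grpSpec s == "metals"))).update
        (symbols.filter (fun s => grpSpec s == "equity_micros"))).update
        (symbols.filter (fun s => grpSpec s == "treasuries"))).update
        (symbols.filter (fun s => grpSpec s == "agriculture"))) ↔
        grpSpec s = "metals" ∨ grpSpec s = "equity_micros" ∨ grpSpec s = "treasuries" ∨
        grpSpec s = "agriculture" := by
      simp [PySem.Set.mem_update, List.mem_filter, hs, PySem.Set.empty, or_assoc]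
    rcases grpSpec_cases s with h | h | h | h | h <;>
      simp [h, PySem.Set.contains_iff, hmem, hs]
  rw [alt_canon]
  simp only [symbols_to_groups_py, assetGroups, List.foldl_cons, List.foldl_nil]
  simp only [funext contains_metals, funext contains_equity, funext contains_treas,
    funext contains_agri]
  simp only [step_pair]
  simp only [hrem, olist]
  split_ifs <;>
    simp_all [PySem.Dict.items_insert, PySem.Dict.contains_insert, PySem.Dict.empty]

-- ===== VERDICT (by name: the statement is the Claim_ definition above) =====
theorem symbols_to_groups_py_spec : Claim_equal_symbols_to_groups_py := by
  intro symbols _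
  unfold Spec_symbols_to_groups_py
  exact a_eq_alt symbols
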